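-- pv_equiv track=rewrite | github.com/soumithbabburi/cipherq-neurorepurpose | dynamic_literature_optimizer.py | _deduplicate_and_rank_strategies
-- ===== SOURCE A (Python) =====
-- from typing import Dict, List, Any, Optional, Tuple
--
-- def _deduplicate_and_rank_strategies(strategies: List[Dict]) -> List[Dict]:
--     """Remove duplicate strategies and rank by evidence level"""
--     # Remove duplicates based on area
--     unique_strategies = {}
--     for strategy in strategies:
--         area = strategy.get('area', '')
--         if area not in unique_strategies:
--             unique_strategies[area] = strategy
--         else:
--             # Keep the one with higher evidence level
--             existing_evidence = unique_strategies[area].get('evidence_level', '')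
--             new_evidence = strategy.get('evidence_level', '')
--             if 'High' in new_evidence and 'High' not in existing_evidence:
--                 unique_strategies[area] = strategy
--
--     # Sort by evidence level
--     strategy_list = list(unique_strategies.values())
--     strategy_list.sort(key=lambda x: (
--         0 if 'High' in x.get('evidence_level', '') else
--         1 if 'Medium' in x.get('evidence_level', '') else 2
--     ))
--
--     return strategy_list
-- ===== SOURCE B (Python) =====
-- def _deduplicate_and_rank_strategies(strategies):
--     """Remove duplicate strategies and rank by evidence level"""
--     # Group strategies by area in first-appearance order
--     groups = {}
--     for strategy in strategies:
--         groups.setdefault(strategy.get('area', ''), []).append(strategy)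
--     # Each area's representative: first High-evidence entry, else first entry
--     reps = [max(group, key=lambda s: 'High' in s.get('evidence_level', ''))
--             for group in groups.values()]
--     # Rank by evidence level
--     reps.sort(key=lambda x: (
--         0 if 'High' in x.get('evidence_level', '') else
--         1 if 'Medium' in x.get('evidence_level', '') else 2
--     ))
--     return reps
-- ===== Notes on version B (the rewrite author's own statement) =====
-- stated objective: simpler
-- what changed: Replaces A's single pass with in-place conditional replacement of the dict entry by a group-by-area pass (setdefault) followed by a per-group max(key='High' in evidence) reduction picking each area's representative, then the same evidence-level sort.
import Mathlib
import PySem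

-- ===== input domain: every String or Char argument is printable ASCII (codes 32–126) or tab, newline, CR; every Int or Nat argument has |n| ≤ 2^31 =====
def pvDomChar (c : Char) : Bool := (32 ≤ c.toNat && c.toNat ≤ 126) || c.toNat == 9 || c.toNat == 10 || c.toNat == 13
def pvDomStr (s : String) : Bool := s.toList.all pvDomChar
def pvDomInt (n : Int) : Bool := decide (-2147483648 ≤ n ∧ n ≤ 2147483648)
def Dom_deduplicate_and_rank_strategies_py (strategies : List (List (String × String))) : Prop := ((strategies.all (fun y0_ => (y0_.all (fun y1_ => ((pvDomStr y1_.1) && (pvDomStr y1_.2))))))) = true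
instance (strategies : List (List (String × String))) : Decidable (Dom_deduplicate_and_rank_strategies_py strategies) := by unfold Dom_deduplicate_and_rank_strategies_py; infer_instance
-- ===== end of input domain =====

-- B reshapes A's single conditional-replacement pass into group-by-area then per-group max; objective: simpler.

-- shared helper: strategy.get(k, '') on an association-list "dict" (first match)
def pvGet (s : List (String × String)) (k : String) : String :=
  match s.find? (fun p => p.1 == k) with
  | some p => p.2
  | none => ""

-- shared helper: the sort key lambda both Pythons contain verbatim
def pvRankKey (x : List (String × String)) : Int :=
  if PySem.Str.isIn "High" (pvGet x "evidence_level") then 0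
  else if PySem.Str.isIn "Medium" (pvGet x "evidence_level") then 1 else 2

-- ===== PORT A =====
def deduplicate_and_rank_strategies_py (strategies : List (List (String × String))) : List (List (String × String)) :=
  let unique_strategies : PySem.Dict String (List (String × String)) :=
    strategies.foldl (fun u strategy =>
      let area := pvGet strategy "area"
      if u.contains area = false then u.insert area strategy
      else
        let existing_evidence := pvGet (u.getD area []) "evidence_level"
        let new_evidence := pvGet strategy "evidence_level"
        if PySem.Str.isIn "High" new_evidence && !(PySem.Str.isIn "High" existing_evidence) then
          u.insert area strategy
        else u) PySem.Dict.empty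
  PySem.List.sorted unique_strategies.values pvRankKey false

-- ===== PORT B =====
-- max(group, key=lambda s: 'High' in s.get('evidence_level','')): first maximal element
def pvBest (group : List (List (String × String))) : List (String × String) :=
  match group with
  | [] => []
  | h :: t =>
    t.foldl (fun best s =>
      if PySem.Str.isIn "High" (pvGet s "evidence_level")
         && !(PySem.Str.isIn "High" (pvGet best "evidence_level")) then s else best) h

def deduplicate_and_rank_strategies_py_alt (strategies : List (List (String × String))) : List (List (String × String)) :=
  let groups : PySem.Dict String (List (List (String × String))) :=
    strategies.foldl (fun g strategy =>
      g.modify (pvGet strategy "area") [] (fun l => l ++ [strategy])) PySem.Dict.empty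
  let reps := groups.values.map pvBest
  PySem.List.sorted reps pvRankKey false

-- ===== PRECONDITION & SPEC =====
def Spec_deduplicate_and_rank_strategies_py (strategies : List (List (String × String))) (out : List (List (String × String))) : Prop := out = deduplicate_and_rank_strategies_py_alt strategies
instance (strategies : List (List (String × String))) (out : List (List (String × String))) : Decidable (Spec_deduplicate_and_rank_strategies_py strategies out) := by unfold Spec_deduplicate_and_rank_strategies_py; infer_instance

-- ===== CLAIM (what is proved, stated in full; the proofs are below) =====
def Claim_equal_deduplicate_and_rank_strategies_py : Prop := ∀ (strategies : List (List (String × String))), Dom_deduplicate_and_rank_strategies_py strategies → Spec_deduplicate_and_rank_strategies_py strategies (deduplicate_and_rank_strategies_py strategies)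

-- ===== LEMMAS AND PROOFS =====


def pvStepA (u : PySem.Dict String (List (String × String))) (strategy : List (String × String)) :
    PySem.Dict String (List (String × String)) :=
  let area := pvGet strategy "area"
  if u.contains area = false then u.insert area strategy
  else
    let existing_evidence := pvGet (u.getD area []) "evidence_level"
    let new_evidence := pvGet strategy "evidence_level"
    if PySem.Str.isIn "High" new_evidence && !(PySem.Str.isIn "High" existing_evidence) then
      u.insert area strategy
    else u

def pvStepB (g : PySem.Dict String (List (List (String × String)))) (strategy : List (String × String)) :
    PySem.Dict String (List (List (String × String))) :=
  g.modify (pvGet strategy "area") [] (fun l => l ++ [strategy])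

def pvPair (p : String × List (List (String × String))) : String × List (String × String) :=
  (p.1, pvBest p.2)

theorem pvBest_append (L : List (List (String × String))) (hL : L ≠ []) (s : List (String × String)) :
    pvBest (L ++ [s]) =
      if PySem.Str.isIn "High" (pvGet s "evidence_level")
         && !(PySem.Str.isIn "High" (pvGet (pvBest L) "evidence_level")) then s else pvBest L := by
  obtain ⟨h, t, rfl⟩ := List.exists_cons_of_ne_nil hL
  simp [pvBest, List.foldl_append]

theorem pv_step (u : PySem.Dict String (List (String × String)))
    (g : PySem.Dict String (List (List (String × String)))) (s : List (String × String))
    (hmap : u.items = g.items.map pvPair)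
    (hnd : (g.items.map Prod.fst).Nodup)
    (hne : ∀ p ∈ g.items, p.2 ≠ []) :
    (pvStepA u s).items = (pvStepB g s).items.map pvPair ∧
    ((pvStepB g s).items.map Prod.fst).Nodup ∧
    (∀ p ∈ (pvStepB g s).items, p.2 ≠ []) := by
  obtain ⟨a, ha⟩ : ∃ x, x = pvGet s "area" := ⟨_, rfl⟩
  have hcont : u.contains a = g.contains a := by
    simp only [PySem.Dict.contains, hmap, List.any_map]
    rfl
  by_cases hc : g.contains a = true
  · -- area already present
    have hfs : (g.items.find? (fun p => p.1 == a)).isSome := by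
      simp only [PySem.Dict.contains] at hc
      rcases List.any_eq_true.mp hc with ⟨q0, hq0, hqa0⟩
      exact List.find?_isSome.mpr ⟨q0, hq0, hqa0⟩
    obtain ⟨q, hq⟩ := Option.isSome_iff_exists.mp hfs
    have hqmem : q ∈ g.items := List.mem_of_find?_eq_some hq
    have hqa : q.1 = a := by simpa using List.find?_some hq
    have hL : q.2 ≠ [] := hne q hqmem
    have hgetg : g.getD a [] = q.2 := by
      simp [PySem.Dict.getD, PySem.Dict.get?, hq]
    have hgetu : u.getD a [] = pvBest q.2 := by
      simp only [PySem.Dict.getD, PySem.Dict.get?, hmap, List.find?_map]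
      have hcomp : ((fun (p : String × List (String × String)) => p.1 == a) ∘ pvPair)
          = (fun (p : String × List (List (String × String))) => p.1 == a) := funext fun p => rfl
      rw [hcomp, hq]; rfl
    have hbest := pvBest_append q.2 hL s
    have hBitems : (pvStepB g s).items =
        g.items.map (fun p => if p.1 == a then (a, q.2 ++ [s]) else p) := by
      unfold pvStepB
      rw [PySem.Dict.modify, ← ha, hgetg]
      simp [PySem.Dict.insert, hc]
    have huc : u.contains a = true := hcont.trans hc
    refine ⟨?_, ?_, ?_⟩
    · -- items correspondence
      by_cases hcd : (PySem.Str.isIn "High" (pvGet s "evidence_level")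
          && !(PySem.Str.isIn "High" (pvGet (pvBest q.2) "evidence_level"))) = true
      · have hAitems : (pvStepA u s).items =
            u.items.map (fun p => if p.1 == a then (a, s) else p) := by
          unfold pvStepA
          dsimp only
          rw [← ha, huc, if_neg (by simp), hgetu, if_pos hcd]
          simp [PySem.Dict.insert, huc]
        rw [hAitems, hBitems, hmap, List.map_map, List.map_map]
        apply List.map_congr_left
        intro p _
        by_cases hpa : p.1 = a
        · simp only [Function.comp_apply, pvPair, hpa, beq_self_eq_true, if_true, hbest,
            if_pos hcd]
        · simp only [Function.comp_apply, pvPair]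
          rw [if_neg (by simpa using hpa), if_neg (by simpa using hpa)]
      · have hAitems : (pvStepA u s).items = u.items := by
          unfold pvStepA
          dsimp only
          rw [← ha, huc, if_neg (by simp), hgetu, if_neg hcd]
        rw [hAitems, hBitems, hmap, List.map_map]
        apply List.map_congr_left
        intro p hp
        by_cases hpa : p.1 = a
        · have hpq : p = q := by
            have := List.inj_on_of_nodup_map hnd hp hqmem (by rw [hpa, hqa])
            exact this
          simp only [Function.comp_apply, beq_self_eq_true, if_true, pvPair, hbest,
            if_neg hcd, hpq, hqa]
        · simp only [Function.comp_apply, pvPair]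
          rw [if_neg (by simpa using hpa)]
    · -- keys unchanged
      rw [hBitems, List.map_map]
      have heq : (Prod.fst ∘ (fun (p : String × List (List (String × String))) =>
          if p.1 == a then (a, q.2 ++ [s]) else p)) = Prod.fst := by
        funext p
        by_cases hpa : p.1 = a <;> simp [Function.comp, hpa]
      rw [show (List.map (Prod.fst ∘ fun p => if p.1 == a then (a, q.2 ++ [s]) else p) g.items)
            = List.map Prod.fst g.items from by rw [heq]]
      exact hnd
    · -- values nonempty
      intro p hp
      rw [hBitems] at hp
      rcases List.mem_map.mp hp with ⟨p0, hp0, hp0eq⟩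
      by_cases hpa : p0.1 = a
      · rw [← hp0eq, if_pos (by simp [hpa])]
        simp
      · rw [← hp0eq, if_neg (by simp [hpa])]
        exact hne p0 hp0
  · -- fresh area
    have hc' : g.contains a = false := by simpa using hc
    have hanotin : a ∉ g.items.map Prod.fst := by
      intro hmem
      rcases List.mem_map.mp hmem with ⟨p, hp, hpa⟩
      have : g.contains a = true := by
        simp only [PySem.Dict.contains]
        exact List.any_eq_true.mpr ⟨p, hp, by simp [hpa]⟩
      exact hc this
    have hgetg : g.getD a [] = [] := by
      simp only [PySem.Dict.getD, PySem.Dict.get?]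
      rw [List.find?_eq_none.mpr]
      · rfl
      · intro p hp hpa
        exact hanotin (List.mem_map.mpr ⟨p, hp, by simpa using hpa⟩)
    have hBitems : (pvStepB g s).items = g.items ++ [(a, [s])] := by
      unfold pvStepB
      rw [PySem.Dict.modify, ← ha, hgetg]
      simp [PySem.Dict.insert, hc']
    have huc : u.contains a = false := hcont.trans hc'
    refine ⟨?_, ?_, ?_⟩
    · have hAitems : (pvStepA u s).items = u.items ++ [(a, s)] := by
        unfold pvStepA
        dsimp only
        rw [← ha, huc, if_pos rfl]
        simp only [PySem.Dict.insert, huc, Bool.false_eq_true, if_false]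
      rw [hAitems, hBitems, List.map_append, hmap]
      rfl
    · rw [hBitems, List.map_append]
      simp only [List.map_cons, List.map_nil]
      exact List.Nodup.append hnd (List.nodup_singleton a)
        (List.disjoint_singleton.mpr hanotin)
    · intro p hp
      rw [hBitems] at hp
      rcases List.mem_append.mp hp with h | h
      · exact hne p h
      · rw [List.mem_singleton.mp h]
        simp

theorem pv_fold (l : List (List (String × String))) :
    ∀ (u : PySem.Dict String (List (String × String)))
      (g : PySem.Dict String (List (List (String × String)))),
    u.items = g.items.map pvPair →
    (g.items.map Prod.fst).Nodup →
    (∀ p ∈ g.items, p.2 ≠ []) →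
    (l.foldl pvStepA u).items = (l.foldl pvStepB g).items.map pvPair := by
  induction l with
  | nil => intro u g hmap _ _; simpa using hmap
  | cons s t ih =>
    intro u g hmap hnd hne
    obtain ⟨h1, h2, h3⟩ := pv_step u g s hmap hnd hne
    simpa using ih (pvStepA u s) (pvStepB g s) h1 h2 h3

theorem pv_main (strategies : List (List (String × String))) :
    deduplicate_and_rank_strategies_py strategies = deduplicate_and_rank_strategies_py_alt strategies := by
  have hfold := pv_fold strategies PySem.Dict.empty PySem.Dict.empty (by rfl) (by simp [PySem.Dict.empty]) (by simp [PySem.Dict.empty])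
  show PySem.List.sorted (strategies.foldl pvStepA PySem.Dict.empty).values pvRankKey false
     = PySem.List.sorted ((strategies.foldl pvStepB PySem.Dict.empty).values.map pvBest) pvRankKey false
  congr 1
  simp only [PySem.Dict.values, hfold, List.map_map]
  rfl

-- ===== VERDICT (by name: the statement is the Claim_ definition above) =====
theorem deduplicate_and_rank_strategies_py_spec : Claim_equal_deduplicate_and_rank_strategies_py := by
  intro s _
  exact pv_main s
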